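-- pv_equiv track=rewrite | github.com/leonlza27/lightMLP | python_scripts_helpers/exp_lut_generator.py | format_lut
-- ===== SOURCE A (Python) =====
-- def format_lut(lut, values_per_line=8):
--     """格式化LUT表为C数组定义
--
--     Args:
--         lut: LUT表
--         values_per_line: 每行显示的值数量
--
--     Returns:
--         格式化后的字符串
--     """
--     lines = []
--     for i in range(0, len(lut), values_per_line):
--         line_values = lut[i:i+values_per_line]
--         line = ",".join([str(v) for v in line_values])
--         if i + values_per_line < len(lut):
--             line += ","
--         lines.append(line)
--
--     return "\n".join(lines)
-- ===== SOURCE B (Python) =====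
-- def format_lut(lut, values_per_line=8):
--     """Single flat pass: emit each value once, with the separator chosen per
--     position (',' inside a line, ',\n' at a line break, nothing at the end)."""
--     n = len(lut)
--     parts = []
--     for i, v in enumerate(lut):
--         parts.append(str(v))
--         if i + 1 < n:
--             parts.append(",\n" if (i + 1) % values_per_line == 0 else ",")
--     return "".join(parts)
-- ===== Notes on version B (the rewrite author's own statement) =====
-- stated objective: simpler
-- what changed: B replaces A's chunk-slicing loop (range stepping, per-chunk slice, per-line join, join of lines) by one flat pass over the elements that emits each value followed by the separator the position calls for (',' inside a line, ',\n' at a line break, nothing after the last value).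
-- outside the precondition, e.g. on format_lut([1, 2], -1): A returns '', B returns '1,\n2'
import Mathlib
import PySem

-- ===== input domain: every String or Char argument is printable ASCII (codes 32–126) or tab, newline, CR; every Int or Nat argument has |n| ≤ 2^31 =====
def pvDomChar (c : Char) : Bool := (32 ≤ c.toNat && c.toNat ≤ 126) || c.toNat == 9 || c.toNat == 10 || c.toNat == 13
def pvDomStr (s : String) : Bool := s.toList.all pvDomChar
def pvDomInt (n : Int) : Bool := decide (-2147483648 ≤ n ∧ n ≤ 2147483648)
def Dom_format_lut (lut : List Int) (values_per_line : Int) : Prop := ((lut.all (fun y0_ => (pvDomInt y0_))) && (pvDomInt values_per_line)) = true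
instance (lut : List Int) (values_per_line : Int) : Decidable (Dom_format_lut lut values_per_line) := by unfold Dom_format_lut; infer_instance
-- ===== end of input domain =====

-- B formats the LUT in one flat pass over the elements (each value followed by the
-- separator its position calls for) instead of A's chunk-slicing loop; objective: simpler.

-- ===== PORT A =====
def format_lut (lut : List Int) (values_per_line : Int) : String :=
  let lines : List (List Char) :=
    (PySem.List.pyRange 0 (PySem.List.len lut) values_per_line).foldl
      (fun lines i =>
        let line_values := PySem.List.slice lut (some i) (some (i + values_per_line))
        let line := PySem.Chars.join [','] (line_values.map (fun v => PySem.Int.toChars v))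
        let line := if i + values_per_line < PySem.List.len lut then line ++ [','] else line
        lines ++ [line]) []
  String.ofList (PySem.Chars.join ['\n'] lines)

-- ===== PORT B =====
def format_lut_alt (lut : List Int) (values_per_line : Int) : String :=
  let n := PySem.List.len lut
  let parts : List (List Char) :=
    (PySem.List.enumerate lut 0).foldl
      (fun parts iv =>
        let parts := parts ++ [PySem.Int.toChars iv.2]
        if iv.1 + 1 < n then
          parts ++ [if PySem.Int.mod (iv.1 + 1) values_per_line = 0 then [',', '\n'] else [',']]
        else parts) []
  String.ofList (PySem.Chars.join [] parts)

-- ===== PRECONDITION & SPEC =====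
-- Pre_ restricts to the natural domain values_per_line ≥ 1 (plus the trivial empty list):
-- A raises ValueError at values_per_line = 0 (range() step 0), and for negative
-- values_per_line with a nonempty lut the corner is one nobody would specify: A's range is
-- empty so A returns '' (dropping every value), while B's per-position separators still
-- format the values — both readings are defensible, so those inputs are excluded.
def Pre_format_lut (lut : List Int) (values_per_line : Int) : Prop :=
  1 ≤ values_per_line ∨ (lut = [] ∧ values_per_line ≠ 0)
instance (lut : List Int) (values_per_line : Int) : Decidable (Pre_format_lut lut values_per_line) := by unfold Pre_format_lut; infer_instance

def pvWitness_format_lut : List Int × Int := ([1, 2, 3], 2)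

def Spec_format_lut (lut : List Int) (values_per_line : Int) (out : String) : Prop := out = format_lut_alt lut values_per_line
instance (lut : List Int) (values_per_line : Int) (out : String) : Decidable (Spec_format_lut lut values_per_line out) := by unfold Spec_format_lut; infer_instance

-- ===== CLAIM (what is proved, stated in full; the proofs are below) =====
def Claim_equal_format_lut : Prop := ∀ (lut : List Int) (values_per_line : Int), Dom_format_lut lut values_per_line → Pre_format_lut lut values_per_line → Spec_format_lut lut values_per_line (format_lut lut values_per_line)

-- ===== LEMMAS AND PROOFS =====

lemma pvRange_pos_cons (a b s : Int) (hs : 0 < s) (hab : a < b) :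
    PySem.List.pyRange a b s = a :: PySem.List.pyRange (a + s) b s := by
  have hM : b - a + s - 1 = (b - a - 1) + 1 * s := by ring
  have hdiv : (b - a + s - 1) / s = (b - a - 1) / s + 1 := by
    rw [hM, Int.add_mul_ediv_right _ _ (by omega : s ≠ 0)]
  have hq0 : 0 ≤ (b - a - 1) / s := Int.ediv_nonneg (by omega) (by omega)
  have hN : ((b - a + s - 1) / s).toNat = ((b - a - 1) / s).toNat + 1 := by omega
  have he : b - (a + s) + s - 1 = b - a - 1 := by ring
  simp only [PySem.List.pyRange]
  split_ifs with h0 h1 <;> try omega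
  · rw [he, hN, List.range_succ_eq_map, List.map_cons, List.map_map]
    congr 1
    · simp
    · apply List.map_congr_left
      intro k _
      simp only [Function.comp_apply]
      push_cast
      ring
  · have h2 : (b - a - 1) / s = 0 := Int.ediv_eq_zero_of_lt (by omega) (by omega)
    rw [hN, h2]
    simp

lemma pvRange_pos_nil (a b s : Int) (hs : 0 < s) (hab : b ≤ a) :
    PySem.List.pyRange a b s = [] := by
  simp only [PySem.List.pyRange]
  split_ifs with h1 h2
  all_goals simp_all
  all_goals omega

def pvChunkSpec (km : Nat) : List Int → List Char
  | [] => []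
  | x :: xs =>
    PySem.Chars.join [','] (((x :: xs).take (km + 1)).map PySem.Int.toChars) ++
      (if km + 1 < (x :: xs).length then
        ',' :: '\n' :: pvChunkSpec km ((x :: xs).drop (km + 1)) else [])
  termination_by l => l.length
  decreasing_by simp

theorem pvA_genN (sn : Nat) (hs : 1 ≤ sn) :
    ∀ (N : Nat) (lut done : List Int), lut.length = N →
    PySem.Chars.join ['\n']
      ((PySem.List.pyRange done.length (done.length + lut.length) sn).map
        (fun i =>
          if i + (sn : Int) < (done.length + lut.length : Int) then
            PySem.Chars.join [','] ((PySem.List.slice (done ++ lut) (some i) (some (i + sn))).map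
              (fun v => PySem.Int.toChars v)) ++ [',']
          else
            PySem.Chars.join [','] ((PySem.List.slice (done ++ lut) (some i) (some (i + sn))).map
              (fun v => PySem.Int.toChars v))))
    = pvChunkSpec (sn - 1) lut := by
  intro N
  induction N using Nat.strong_induction_on with
  | _ N IH =>
    intro lut done hN
    cases lut with
    | nil =>
      have hnil := pvRange_pos_nil ((done.length : Int)) ((done.length : Int) + (([] : List Int).length : Int)) (sn : Int) (by exact_mod_cast hs) (by simp)
      rw [hnil]
      simp [pvChunkSpec, PySem.Chars.join_nil]
    | cons x xs =>
      have hsn1 : sn - 1 + 1 = sn := by omega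
      have hcons := pvRange_pos_cons ((done.length : Int)) ((done.length : Int) + ((x :: xs).length : Int)) (sn : Int) (by exact_mod_cast hs) (by push_cast [List.length_cons]; omega)
      rw [hcons, List.map_cons]
      simp only [PySem.List.slice_natCast_add, List.drop_left]
      by_cases hcase : sn < (x :: xs).length
      · -- another chunk follows
        have IH2 := IH ((x :: xs).length - sn) (by omega)
          ((x :: xs).drop sn) (done ++ (x :: xs).take sn) (by simp)
        have h1 : (((done ++ (x :: xs).take sn).length : Int)) = (done.length : Int) + (sn : Int) := by
          simp only [List.length_append, List.length_take]
          push_cast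
          omega
        have h2 : (((done ++ (x :: xs).take sn).length : Int) + (((x :: xs).drop sn).length : Int)) = (done.length : Int) + ((x :: xs).length : Int) := by
          simp only [List.length_append, List.length_take, List.length_drop]
          push_cast
          omega
        have h3 : (done ++ (x :: xs).take sn) ++ (x :: xs).drop sn = done ++ (x :: xs) := by
          rw [List.append_assoc, List.take_append_drop]
        rw [h2, h1, h3] at IH2
        have hlt : ((done.length : Int) + (sn : Int)) < ((done.length : Int) + ((x :: xs).length : Int)) := by
          omega
        rw [pvRange_pos_cons ((done.length : Int) + (sn : Int)) ((done.length : Int) + ((x :: xs).length : Int)) (sn : Int) (by exact_mod_cast hs) hlt, List.map_cons] at IH2 ⊢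
        rw [PySem.Chars.join_cons_cons, IH2]
        rw [if_pos (by omega)]
        conv_rhs => rw [pvChunkSpec]
        rw [hsn1, if_pos hcase]
        simp [List.append_assoc]
      · -- last chunk
        have hnil2 := pvRange_pos_nil ((done.length : Int) + (sn : Int)) ((done.length : Int) + ((x :: xs).length : Int)) (sn : Int) (by exact_mod_cast hs) (by omega)
        rw [hnil2, List.map_nil, PySem.Chars.join_singleton, if_neg (by omega)]
        conv_rhs => rw [pvChunkSpec]
        rw [hsn1, if_neg hcase]
        simp

lemma pvFlat_chunk (sn : Nat) (ntot : Int) :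
    ∀ (c : List Int) (i : Int), c ≠ [] →
      (∀ j : Nat, j + 1 < c.length → (¬ ((sn : Int) ∣ (i + j + 1)) ∧ i + j + 1 < ntot)) →
    (PySem.List.enumerate c i).flatMap
      (fun iv => PySem.Int.toChars iv.2 ++
        (if iv.1 + 1 < ntot then
          (if PySem.Int.mod (iv.1 + 1) sn = 0 then [',', '\n'] else [',']) else []))
    = PySem.Chars.join [','] (c.map (fun v => PySem.Int.toChars v)) ++
      (if i + c.length < ntot then
        (if PySem.Int.mod (i + c.length) sn = 0 then [',', '\n'] else [',']) else []) := by
  intro c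
  induction c with
  | nil => intro i h; exact absurd rfl h
  | cons x t ih =>
    intro i _ hsep
    cases t with
    | nil =>
      simp only [PySem.List.enumerate_cons, PySem.List.enumerate_nil, List.flatMap_cons,
        List.flatMap_nil, List.map_cons, List.map_nil, PySem.Chars.join_singleton,
        List.length_cons, List.length_nil]
      simp
    | cons y t2 =>
      have h0 := hsep 0 (by simp)
      have h0' : PySem.Int.mod (i + 1) sn ≠ 0 := by
        rw [Ne, PySem.Int.mod_eq_zero_iff_dvd]
        simpa using h0.1
      have hlt0 : i + 1 < ntot := by simpa using h0.2
      rw [PySem.List.enumerate_cons, List.flatMap_cons,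
        ih (i + 1) (by simp) (by
          intro j hj
          have := hsep (j + 1) (by simp at hj ⊢; omega)
          constructor
          · have h := this.1; push_cast at h ⊢; ring_nf at h ⊢; exact h
          · have h := this.2; push_cast at h ⊢; omega)]
      simp only [List.map_cons, PySem.Chars.join_cons_cons]
      have hl : i + 1 + ((y :: t2).length : Int) = i + ((x :: y :: t2).length : Int) := by
        push_cast [List.length_cons]; ring
      rw [hl]
      simp [hlt0, h0', List.append_assoc]

theorem pvB_genN (sn : Nat) (hs : 1 ≤ sn) :
    ∀ (N : Nat) (q : Nat) (lut : List Int) (ntot : Int),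
    lut.length = N → ntot = ((q * sn : Nat) : Int) + (lut.length : Int) →
    (PySem.List.enumerate lut ((q * sn : Nat) : Int)).flatMap
      (fun iv => PySem.Int.toChars iv.2 ++
        (if iv.1 + 1 < ntot then
          (if PySem.Int.mod (iv.1 + 1) sn = 0 then [',', '\n'] else [',']) else []))
    = pvChunkSpec (sn - 1) lut := by
  intro N
  induction N using Nat.strong_induction_on with
  | _ N IH =>
    intro q lut ntot hN hn
    cases lut with
    | nil => simp [PySem.List.enumerate_nil, pvChunkSpec]
    | cons x xs =>
      have hsn1 : sn - 1 + 1 = sn := by omega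
      have hlen1 : 1 ≤ (x :: xs).length := by simp
      conv_lhs => rw [← List.take_append_drop sn (x :: xs)]
      rw [PySem.List.enumerate_append, List.flatMap_append]
      have hclen : ((x :: xs).take sn).length = min sn (x :: xs).length := List.length_take
      have hcne : (x :: xs).take sn ≠ [] := by
        intro h
        have := congrArg List.length h
        simp [hclen] at this
        omega
      rw [pvFlat_chunk sn ntot ((x :: xs).take sn) (((q * sn : Nat) : Int)) hcne (by
        intro j hj
        rw [hclen] at hj
        constructor
        · intro hdvd
          have hq : ((sn : Int)) ∣ ((q * sn : Nat) : Int) := by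
            exact ⟨q, by push_cast; ring⟩
          have h2 : ((sn : Int)) ∣ ((j : Int) + 1) := by
            have := (Int.dvd_add_right hq).mp (by
              have : ((q * sn : Nat) : Int) + (j : Int) + 1 = ((q * sn : Nat) : Int) + ((j : Int) + 1) := by ring
              rwa [this] at hdvd)
            exact this
          have h3 : (sn : Int) ≤ (j : Int) + 1 := Int.le_of_dvd (by omega) h2
          omega
        · omega)]
      by_cases hcase : sn < (x :: xs).length
      · have hclen' : (((x :: xs).take sn).length : Int) = (sn : Int) := by
          rw [hclen]; push_cast; omega
        rw [hclen']
        have hmod : PySem.Int.mod (((q * sn : Nat) : Int) + (sn : Int)) sn = 0 := by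
          rw [PySem.Int.mod_eq_zero_iff_dvd]
          push_cast
          exact ⟨q + 1, by ring⟩
        rw [if_pos (by omega), if_pos hmod]
        have hstart : ((q * sn : Nat) : Int) + (sn : Int) = (((q + 1) * sn : Nat) : Int) := by
          push_cast; ring
        rw [hstart]
        rw [IH ((x :: xs).length - sn) (by omega) (q + 1) ((x :: xs).drop sn) ntot
          (by simp) (by
            rw [hn]
            have h1 : (q + 1) * sn = q * sn + sn := by ring
            simp only [List.length_drop, h1]
            push_cast
            omega)]
        conv_rhs => rw [pvChunkSpec]
        rw [hsn1, if_pos hcase]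
        simp [List.append_assoc]
      · have hrest : (x :: xs).drop sn = [] := List.drop_eq_nil_of_le (by omega)
        have htake : (x :: xs).take sn = x :: xs := List.take_of_length_le (by omega)
        rw [hrest, htake, PySem.List.enumerate_nil, List.flatMap_nil]
        rw [if_neg (by push_cast at hn ⊢; omega)]
        conv_rhs => rw [pvChunkSpec]
        rw [hsn1, if_neg hcase, htake]
        simp

lemma pvRange_self (a s : Int) : PySem.List.pyRange a a s = [] := by
  simp [PySem.List.pyRange]

lemma pvJoin_nil_sep (ps : List (List Char)) : PySem.Chars.join [] ps = ps.flatten := by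
  induction ps with
  | nil => simp [PySem.Chars.join_nil]
  | cons p q ih =>
    cases q with
    | nil => simp [PySem.Chars.join_singleton]
    | cons r rest => rw [PySem.Chars.join_cons_cons]; simp_all

lemma pvBfold (n vpl : Int) :
    ∀ (l : List (Int × Int)) (acc : List (List Char)),
    PySem.Chars.join []
      (l.foldl (fun parts iv =>
        if iv.1 + 1 < n then
          (parts ++ [PySem.Int.toChars iv.2]) ++
            [if PySem.Int.mod (iv.1 + 1) vpl = 0 then [',', '\n'] else [',']]
        else parts ++ [PySem.Int.toChars iv.2]) acc)
    = PySem.Chars.join [] acc ++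
      l.flatMap (fun iv => PySem.Int.toChars iv.2 ++
        (if iv.1 + 1 < n then
          (if PySem.Int.mod (iv.1 + 1) vpl = 0 then [',', '\n'] else [',']) else [])) := by
  intro l
  induction l with
  | nil => simp
  | cons x t ih =>
    intro acc
    simp only [List.foldl_cons, List.flatMap_cons]
    rw [ih]
    simp only [pvJoin_nil_sep]
    split_ifs <;> simp

theorem format_lut_spec_main (lut : List Int) (vpl : Int) (hpre : 1 ≤ vpl ∨ (lut = [] ∧ vpl ≠ 0)) :
    format_lut lut vpl = format_lut_alt lut vpl := by
  rcases hpre with h1 | ⟨hnil, _⟩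
  · have hv : vpl = ((vpl.toNat : Nat) : Int) := (Int.toNat_of_nonneg (by omega)).symm
    have hs : 1 ≤ vpl.toNat := by omega
    unfold format_lut format_lut_alt
    rw [PySem.List.len_eq]
    rw [hv]
    refine congrArg String.ofList ?_
    rw [PySem.List.foldl_append_singleton_eq_map, List.nil_append]
    rw [pvBfold ((lut.length : Nat) : Int) ((vpl.toNat : Nat) : Int), PySem.Chars.join_nil, List.nil_append]
    have hA := pvA_genN vpl.toNat hs lut.length lut [] rfl
    simp only [List.length_nil, Nat.cast_zero, zero_add, List.nil_append] at hA
    have hB := pvB_genN vpl.toNat hs lut.length 0 lut ((lut.length : Int)) rfl (by simp)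
    simp only [Nat.zero_mul, Nat.cast_zero] at hB
    rw [hA, hB]
  · subst hnil
    simp [format_lut, format_lut_alt, pvRange_self, PySem.List.enumerate_nil,
      PySem.Chars.join_nil]

-- ===== VERDICT (by name: the statement is the Claim_ definition above) =====
theorem format_lut_spec : Claim_equal_format_lut := by
  intro lut values_per_line _ hp
  unfold Pre_format_lut at hp
  unfold Spec_format_lut
  exact format_lut_spec_main lut values_per_line hp
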